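-- pv_equiv track=rewrite | github.com/basilegithub/Multiple-Polynomial-Quadratic-Sieve | src/build_matrix.py | build_sparse_matrix
-- ===== SOURCE A (Python) =====
-- def build_sparse_matrix(relations, primes):
--     bin_matrix = []
--     line = []
--     for i in range(len(relations)):
--         if relations[i] < 0: line.append(i)
--     bin_matrix.append(set(line))
--     for i in range(len(primes)):
--         line = []
--         for j in range(len(relations)):
--             tmp = 0
--             tmp2 = primes[i]
--             while not relations[j]%tmp2:
--                 tmp ^= 1
--                 tmp2 *= primes[i]
--             if tmp: line.append(j)
--         bin_matrix.append(set(line))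
--     while bin_matrix[-1] == []: del bin_matrix[-1]
--     return bin_matrix
-- ===== SOURCE B (Python) =====
-- def _odd_val(q, n):
--     # exponent parity of q in n by binary lifting: build q, q^2, q^4, ...,
--     # then peel the exponent's binary digits off from the top
--     pows = [q]
--     while n % (pows[-1] * pows[-1]) == 0:
--         pows.append(pows[-1] * pows[-1])
--     v, m = 0, n
--     for w in reversed(pows):
--         v *= 2
--         if m % w == 0:
--             m //= w
--             v += 1
--     return v % 2 == 1
--
-- def build_sparse_matrix(relations, primes):
--     # scatter-by-relation: row 0 is the sign row; each relation index is added
--     # to the rows of the primes whose exponent in it is odd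
--     bin_matrix = [{i for i, r in enumerate(relations) if r < 0}]
--     rows = [set() for _ in primes]
--     qs = [abs(p) for p in primes]
--     for j, r in enumerate(relations):
--         a = abs(r)
--         for i, q in enumerate(qs):
--             if a % q == 0 and _odd_val(q, a):
--                 rows[i].add(j)
--     bin_matrix.extend(rows)
--     return bin_matrix
-- ===== Notes on version B (the rewrite author's own statement) =====
-- stated objective: alternative
-- what changed: A gathers row-by-row, testing each relation against the growing powers p, p^2, p^3, ... with an xor parity bit (linearly many divisions in the exponent); B scatters relation-by-relation over precomputed |prime|s, skipping primes that do not divide at all and otherwise computing the exponent by binary lifting (build q, q^2, q^4, ... by repeated squaring, then peel the exponent's binary digits from the top in O(log v) divisions), adding the relation index to that prime's pre-created row when the exponent is odd, and drops A's dead trailing while loop (a set never equals []).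
import Mathlib
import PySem

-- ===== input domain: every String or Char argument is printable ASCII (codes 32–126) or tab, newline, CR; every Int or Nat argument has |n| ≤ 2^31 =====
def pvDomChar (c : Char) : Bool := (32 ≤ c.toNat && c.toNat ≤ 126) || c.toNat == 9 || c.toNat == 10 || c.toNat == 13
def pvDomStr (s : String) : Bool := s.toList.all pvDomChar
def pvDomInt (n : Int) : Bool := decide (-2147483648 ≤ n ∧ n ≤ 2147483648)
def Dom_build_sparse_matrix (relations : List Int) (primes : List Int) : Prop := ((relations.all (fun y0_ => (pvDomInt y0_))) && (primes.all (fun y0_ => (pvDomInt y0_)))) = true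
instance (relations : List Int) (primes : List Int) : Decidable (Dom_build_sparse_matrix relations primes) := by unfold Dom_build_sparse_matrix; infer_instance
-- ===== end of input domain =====

-- B re-decomposes A's gather-by-prime xor-over-growing-powers into a scatter-by-relation pass whose
-- exponent per prime is computed by binary lifting (repeated squaring, then peeling the exponent's
-- binary digits), dropping A's dead trailing `while`; objective: alternative algorithm, same cost.


-- ===== PORT A =====
-- `while not relations[j] % tmp2: tmp ^= 1; tmp2 *= primes[i]` — fuel-guarded (the fuel only makes
-- the recursion total; inside Pre_ and Dom the loop body runs at most 31 times, so 64 never runs out)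
def pvALoop (r p : Int) (tmp tmp2 : Int) : Nat → Int
  | 0 => tmp
  | n + 1 =>
    if PySem.Int.mod r tmp2 = 0 then pvALoop r p (PySem.Int.bxor tmp 1) (tmp2 * p) n else tmp

def build_sparse_matrix (relations : List Int) (primes : List Int) : List (List Int) :=
  let line : List Int :=
    (PySem.List.pyRange 0 (relations.length : Int) 1).foldl
      (fun line i => if PySem.List.pyGetD relations i 0 < 0 then line ++ [i] else line) []
  let bin_matrix : List (List Int) := [] ++ [PySem.Set.ofList line]
  let bin_matrix :=
    (PySem.List.pyRange 0 (primes.length : Int) 1).foldl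
      (fun bin i =>
        let p := PySem.List.pyGetD primes i 0
        let line : List Int :=
          (PySem.List.pyRange 0 (relations.length : Int) 1).foldl
            (fun line j =>
              if pvALoop (PySem.List.pyGetD relations j 0) p 0 p 64 ≠ 0 then line ++ [j]
              else line) []
        bin ++ [PySem.Set.ofList line]) bin_matrix
  -- Python's trailing `while bin_matrix[-1] == []: del bin_matrix[-1]` compares a set with a list:
  -- in Python that comparison is always False, so the loop never runs and is omitted here.
  bin_matrix

-- ===== PORT B =====
-- `pows = [q]; while n % (pows[-1]*pows[-1]) == 0: pows.append(pows[-1]*pows[-1])` — fuel-guarded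
-- exactly as in port A (inside Pre_ and Dom at most 5 appends happen, so 64 never runs out)
def pvPowsLoop (n w : Int) : Nat → List Int
  | 0 => []
  | f + 1 =>
    if PySem.Int.mod n (w * w) = 0 then (w * w) :: pvPowsLoop n (w * w) f else []

-- one step of `for w in reversed(pows): v *= 2; if m % w == 0: m //= w; v += 1`
def pvValStep (vm : Int × Int) (w : Int) : Int × Int :=
  let v := vm.1 * 2
  if PySem.Int.mod vm.2 w = 0 then (v + 1, PySem.Int.floordiv vm.2 w) else (v, vm.2)

def pvBVal (q n : Int) : Int :=
  ((q :: pvPowsLoop n q 64).reverse.foldl pvValStep (0, n)).1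

-- `return v % 2 == 1` of _odd_val
def pvOddVal (q n : Int) : Bool := decide (PySem.Int.mod (pvBVal q n) 2 = 1)

def build_sparse_matrix_alt (relations : List Int) (primes : List Int) : List (List Int) :=
  let sign : List Int :=
    PySem.Set.ofList
      ((PySem.List.enumerate relations 0).foldl
        (fun acc ir => if ir.2 < 0 then acc ++ [ir.1] else acc) [])
  let rows : List (List Int) := primes.map (fun _ => PySem.Set.empty)
  let qs : List Int := primes.map (fun p => |p|)
  let rows :=
    (PySem.List.enumerate relations 0).foldl
      (fun rows jr =>
        let a := |jr.2|
        (PySem.List.enumerate qs 0).foldl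
          (fun rows ip =>
            if PySem.Int.mod a ip.2 = 0 ∧ pvOddVal ip.2 a = true then
              rows.modify ip.1.toNat (fun s => PySem.Set.add s jr.1)
            else rows)
          rows)
      rows
  [sign] ++ rows

-- ===== PRECONDITION & SPEC =====
-- Pre_ excludes exactly the inputs on which the Python A never returns: when both lists are
-- nonempty (so the inner while loop is reached), a prime 0 raises ZeroDivisionError, and a
-- prime ±1 or a relation 0 makes the inner while loop run forever.
def Pre_build_sparse_matrix (relations : List Int) (primes : List Int) : Prop :=
  (primes ≠ [] → ∀ r ∈ relations, r ≠ 0) ∧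
  (relations ≠ [] → ∀ p ∈ primes, p ≠ -1 ∧ p ≠ 0 ∧ p ≠ 1)
instance (relations : List Int) (primes : List Int) : Decidable (Pre_build_sparse_matrix relations primes) := by unfold Pre_build_sparse_matrix; infer_instance

def pvWitness_build_sparse_matrix : List Int × List Int := ([-6, 35, 12], [2, 3, 5, 7])

def Spec_build_sparse_matrix (relations : List Int) (primes : List Int) (out : List (List Int)) : Prop := out = build_sparse_matrix_alt relations primes
instance (relations : List Int) (primes : List Int) (out : List (List Int)) : Decidable (Spec_build_sparse_matrix relations primes out) := by unfold Spec_build_sparse_matrix; infer_instance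

-- ===== CLAIM (what is proved, stated in full; the proofs are below) =====
def Claim_equal_build_sparse_matrix : Prop := ∀ (relations : List Int) (primes : List Int), Dom_build_sparse_matrix relations primes → Pre_build_sparse_matrix relations primes → Spec_build_sparse_matrix relations primes (build_sparse_matrix relations primes)

-- ===== LEMMAS AND PROOFS =====

-- proof-side linear-division counter: the reference valuation loop both ports are compared to
def pvBLoop (q e m : Int) : Nat → Int
  | 0 => e
  | n + 1 =>
    if PySem.Int.mod m q = 0 then pvBLoop q (e + 1) (PySem.Int.floordiv m q) n else e

-- the row a prime contributes, in gather form: indices of relations with odd exponent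
def pvGather (f : Int → Bool) (relations : List Int) : List Int :=
  ((PySem.List.enumerate relations 0).filter (fun jr => f jr.2)).map (·.1)

theorem pvBxor_step (e : Int) : PySem.Int.bxor (PySem.Int.mod e 2) 1 = PySem.Int.mod (e + 1) 2 := by
  rw [PySem.Int.mod_eq_emod_of_pos (a := e) (by norm_num),
      PySem.Int.mod_eq_emod_of_pos (a := e + 1) (by norm_num)]
  have h : e % 2 = 0 ∨ e % 2 = 1 := by omega
  rcases h with h | h
  · rw [h, show (e + 1) % 2 = 1 by omega]; decide
  · rw [h, show (e + 1) % 2 = 0 by omega]; decide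

-- loop correspondence: A's xor bit over the growing powers d*p, d*p², … of the divisor equals
-- (the linear division count) mod 2, at every fuel — both loops take the same branches step for step
theorem pvLoop_corr (fuel : Nat) : ∀ (p d t e : Int), p ≠ 0 → d ≠ 0 →
    pvALoop (d * t) p (PySem.Int.mod e 2) (d * p) fuel
      = PySem.Int.mod (pvBLoop |p| e |t| fuel) 2 := by
  induction fuel with
  | zero => intro p d t e _ _; rfl
  | succ n ih =>
    intro p d t e hp hd
    rw [pvALoop, pvBLoop]
    have hA : (PySem.Int.mod (d * t) (d * p) = 0) ↔ p ∣ t := by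
      rw [PySem.Int.mod_eq_zero_iff_dvd]; exact mul_dvd_mul_iff_left hd
    have hB : (PySem.Int.mod |t| |p| = 0) ↔ p ∣ t := by
      rw [PySem.Int.mod_eq_zero_iff_dvd, abs_dvd, dvd_abs]
    by_cases hdvd : p ∣ t
    · rw [if_pos (hA.mpr hdvd), if_pos (hB.mpr hdvd)]
      obtain ⟨c, hc⟩ := hdvd
      have habs : |t| = |p| * |c| := by rw [hc, abs_mul]
      rw [PySem.Int.floordiv_eq_ediv_of_pos (abs_pos.mpr hp), habs,
          Int.mul_ediv_cancel_left _ (by simpa using hp)]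
      rw [pvBxor_step, show d * t = (d * p) * c by rw [hc]; ring]
      exact ih p (d * p) c (e + 1) hp (mul_ne_zero hd hp)
    · rw [if_neg (fun h => hdvd (hA.mp h)), if_neg (fun h => hdvd (hB.mp h))]

-- ===== the valuation pvOrdI and its characterization =====
def pvOrdI (q m : Int) : Nat :=
  if h : 2 ≤ q ∧ 1 ≤ m ∧ q ∣ m then pvOrdI q (m / q) + 1 else 0
termination_by m.natAbs
decreasing_by
  obtain ⟨hq, hm, c, hc⟩ := h
  subst hc
  rw [Int.mul_ediv_cancel_left _ (by omega)]
  have hc1 : 1 ≤ c := by nlinarith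
  have : c < q * c := by nlinarith
  omega

theorem pvOrdI_spec_aux : ∀ (N : Nat) (q m : Int), m.natAbs ≤ N → 2 ≤ q → 1 ≤ m →
    q ^ pvOrdI q m ∣ m ∧ ¬ q ^ (pvOrdI q m + 1) ∣ m := by
  intro N
  induction N with
  | zero => intro q m hN hq hm; omega
  | succ n ih =>
    intro q m hN hq hm
    rw [pvOrdI]
    by_cases h : q ∣ m
    · rw [dif_pos ⟨hq, hm, h⟩]
      obtain ⟨c, hc⟩ := h
      subst hc
      rw [Int.mul_ediv_cancel_left _ (by omega)]
      have hc1 : 1 ≤ c := by nlinarith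
      have hlt : c < q * c := by nlinarith
      have hNc : c.natAbs ≤ n := by omega
      obtain ⟨h1, h2⟩ := ih q c hNc hq hc1
      constructor
      · rw [pow_succ, mul_comm (q ^ pvOrdI q c) q]
        exact mul_dvd_mul_left q h1
      · intro hcon
        apply h2
        rw [pow_succ, mul_comm (q ^ (pvOrdI q c + 1)) q] at hcon
        exact (mul_dvd_mul_iff_left (by omega : q ≠ 0)).mp hcon
    · rw [dif_neg (fun hh => h hh.2.2)]
      exact ⟨by simp, by simpa using h⟩

theorem pvOrdI_spec (q m : Int) (hq : 2 ≤ q) (hm : 1 ≤ m) :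
    q ^ pvOrdI q m ∣ m ∧ ¬ q ^ (pvOrdI q m + 1) ∣ m :=
  pvOrdI_spec_aux m.natAbs q m le_rfl hq hm

theorem pvOrdI_le_of_pow_dvd (q m : Int) (hq : 2 ≤ q) (hm : 1 ≤ m) {k : Nat}
    (h : q ^ k ∣ m) : k ≤ pvOrdI q m := by
  by_contra hlt
  exact (pvOrdI_spec q m hq hm).2 (dvd_trans (pow_dvd_pow q (by omega)) h)

theorem pvOrdI_dvd_iff (q m : Int) (hq : 2 ≤ q) (hm : 1 ≤ m) (k : Nat) :
    q ^ k ∣ m ↔ k ≤ pvOrdI q m := by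
  constructor
  · exact pvOrdI_le_of_pow_dvd q m hq hm
  · intro hk
    exact dvd_trans (pow_dvd_pow q hk) (pvOrdI_spec q m hq hm).1

theorem pvOrdI_eq_iff (q m : Int) (hq : 2 ≤ q) (hm : 1 ≤ m) (v : Nat) :
    pvOrdI q m = v ↔ q ^ v ∣ m ∧ ¬ q ^ (v + 1) ∣ m := by
  constructor
  · rintro rfl; exact pvOrdI_spec q m hq hm
  · rintro ⟨h1, h2⟩
    have hv := pvOrdI_le_of_pow_dvd q m hq hm h1
    by_contra hne
    exact h2 ((pvOrdI_dvd_iff q m hq hm (v + 1)).mpr (by omega))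

-- dividing out q^e drops the valuation by e
theorem pvOrdI_div_pow (q m : Int) (hq : 2 ≤ q) (hm : 1 ≤ m) (e : Nat) (h : q ^ e ∣ m) :
    1 ≤ m / q ^ e ∧ pvOrdI q (m / q ^ e) = pvOrdI q m - e := by
  have he : e ≤ pvOrdI q m := pvOrdI_le_of_pow_dvd q m hq hm h
  obtain ⟨c, hc⟩ := h
  have hqe : (0:Int) < q ^ e := pow_pos (by omega) e
  have hdiv : m / q ^ e = c := by rw [hc, Int.mul_ediv_cancel_left _ (by omega)]
  have hc1 : 1 ≤ c := by nlinarith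
  refine ⟨hdiv ▸ hc1, ?_⟩
  rw [hdiv, pvOrdI_eq_iff q c hq hc1]
  obtain ⟨h1, h2⟩ := pvOrdI_spec q m hq hm
  constructor
  · have : q ^ e * q ^ (pvOrdI q m - e) ∣ q ^ e * c := by
      rw [← pow_add, ← hc]; exact (by rw [show e + (pvOrdI q m - e) = pvOrdI q m by omega]; exact h1)
    exact (mul_dvd_mul_iff_left (by positivity : (q:Int) ^ e ≠ 0)).mp this
  · intro hcon
    apply h2
    have hstep : q ^ e * q ^ (pvOrdI q m - e + 1) ∣ q ^ e * c := mul_dvd_mul_left _ hcon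
    rw [← pow_add, show e + (pvOrdI q m - e + 1) = pvOrdI q m + 1 by omega, ← hc] at hstep
    exact hstep

-- the valuation is at most 31 on the stated domain
theorem pvOrdI_le_31 (q m : Int) (hq : 2 ≤ q) (hm : 1 ≤ m) (hb : m ≤ 2 ^ 31) :
    pvOrdI q m ≤ 31 := by
  have h1 : q ^ pvOrdI q m ∣ m := (pvOrdI_spec q m hq hm).1
  have h2 : q ^ pvOrdI q m ≤ m := Int.le_of_dvd (by omega) h1
  have h3 : (2:Int) ^ pvOrdI q m ≤ q ^ pvOrdI q m := by
    exact pow_le_pow_left₀ (by norm_num) hq _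
  by_contra hgt
  have h4 : (2:Int) ^ 32 ≤ 2 ^ pvOrdI q m := by
    exact pow_le_pow_right₀ (by norm_num) (by omega)
  norm_num at h4
  omega

-- the linear division counter computes the valuation
theorem pvBLoop_eq_ord (fuel : Nat) : ∀ (q m e : Int), 2 ≤ q → 1 ≤ m → pvOrdI q m ≤ fuel →
    pvBLoop q e m fuel = e + (pvOrdI q m : Int) := by
  induction fuel with
  | zero =>
    intro q m e hq hm hf
    rw [pvBLoop]
    omega
  | succ n ih =>
    intro q m e hq hm hf
    rw [pvBLoop]
    by_cases h : q ∣ m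
    · rw [if_pos (PySem.Int.mod_eq_zero_iff_dvd m q |>.mpr h)]
      have hord : pvOrdI q m = pvOrdI q (m / q) + 1 := by
        rw [pvOrdI, dif_pos ⟨hq, hm, h⟩]
      have hpow : q ^ 1 ∣ m := by simpa using h
      obtain ⟨hm1, hord1⟩ := pvOrdI_div_pow q m hq hm 1 hpow
      rw [PySem.Int.floordiv_eq_ediv_of_pos (by omega)]
      rw [ih q (m / q) (e + 1) hq (by simpa using hm1) (by simp at hord1; omega)]
      simp at hord1
      omega
    · rw [if_neg (fun hh => h (PySem.Int.mod_eq_zero_iff_dvd m q |>.mp hh))]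
      have : pvOrdI q m = 0 := by rw [pvOrdI, dif_neg (fun hh => h hh.2.2)]
      omega

-- exact division collapses: n / q^e / q^t = n / q^(e+t) when q^(e+t) ∣ n
theorem pvdiv_pow_add (q n : Int) (hq : 2 ≤ q) (e t : Nat) (h : q ^ (e + t) ∣ n) :
    n / q ^ e / q ^ t = n / q ^ (e + t) := by
  obtain ⟨c, hc⟩ := h
  subst hc
  rw [pow_add, mul_assoc, Int.mul_ediv_cancel_left _ (by positivity : (q:Int) ^ e ≠ 0),
      Int.mul_ediv_cancel_left _ (by positivity : (q:Int) ^ t ≠ 0),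
      ← mul_assoc, ← pow_add, Int.mul_ediv_cancel_left _ (by positivity : (q:Int) ^ (e + t) ≠ 0)]

theorem pvValStep_def (v m w : Int) :
    pvValStep (v, m) w
      = if PySem.Int.mod m w = 0 then (v * 2 + 1, PySem.Int.floordiv m w) else (v * 2, m) := by
  unfold pvValStep
  dsimp only

-- one pvValStep from the initial state, when the valuation is below 2^(j+1)
theorem pvLift_base (q n : Int) (hq : 2 ≤ q) (hn : 1 ≤ n) (j : Nat)
    (hlt : pvOrdI q n < 2 ^ (j + 1)) :
    pvValStep (0, n) (q ^ 2 ^ j) =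
      (((pvOrdI q n / 2 ^ j : Nat) : Int), n / q ^ (pvOrdI q n - pvOrdI q n % 2 ^ j)) := by
  set V := pvOrdI q n with hV
  have hT : 1 ≤ 2 ^ j := Nat.one_le_two_pow
  have hT2 : 2 ^ (j + 1) = 2 ^ j * 2 := by rw [pow_succ]
  unfold pvValStep
  by_cases h : q ^ 2 ^ j ∣ n
  · have hle : 2 ^ j ≤ V := pvOrdI_le_of_pow_dvd q n hq hn h
    rw [if_pos ((PySem.Int.mod_eq_zero_iff_dvd _ _).mpr h)]
    have hmod : V % 2 ^ j = V - 2 ^ j := by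
      rw [Nat.mod_eq_sub_mod hle, Nat.mod_eq_of_lt (by omega)]
    have hdm := Nat.div_add_mod V (2 ^ j)
    have hdiv : V / 2 ^ j = 1 := by
      have h1 : 2 ^ j * (V / 2 ^ j) = 2 ^ j * 1 := by omega
      exact Nat.eq_of_mul_eq_mul_left (by omega) h1
    rw [PySem.Int.floordiv_eq_ediv_of_pos (by positivity)]
    rw [hdiv, hmod, show V - (V - 2 ^ j) = 2 ^ j by omega]
    norm_num
  · have hlt' : V < 2 ^ j := by
      by_contra hge
      exact h ((pvOrdI_dvd_iff q n hq hn (2 ^ j)).mpr (by omega))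
    rw [if_neg (fun hc => h ((PySem.Int.mod_eq_zero_iff_dvd _ _).mp hc))]
    rw [Nat.div_eq_of_lt hlt', Nat.mod_eq_of_lt hlt', Nat.sub_self, pow_zero, Int.ediv_one]
    norm_num

-- binary lifting computes the high binary digits of the valuation, dividing the matched powers out
theorem pvLift (q n : Int) (hq : 2 ≤ q) (hn : 1 ≤ n) :
    ∀ (fuel j : Nat), pvOrdI q n < 2 ^ (j + 1 + fuel) →
    ((q ^ 2 ^ j :: pvPowsLoop n (q ^ 2 ^ j) fuel).reverse.foldl pvValStep (0, n))
      = (((pvOrdI q n / 2 ^ j : Nat) : Int), n / q ^ (pvOrdI q n - pvOrdI q n % 2 ^ j)) := by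
  intro fuel
  induction fuel with
  | zero =>
    intro j hfj
    rw [pvPowsLoop]
    simpa using pvLift_base q n hq hn j (by simpa using hfj)
  | succ f ih =>
    intro j hfj
    rw [pvPowsLoop]
    have hww : q ^ 2 ^ j * q ^ 2 ^ j = q ^ 2 ^ (j + 1) := by
      rw [← pow_add]
      congr 1
      rw [pow_succ]
      omega
    by_cases hd : q ^ 2 ^ (j + 1) ∣ n
    · rw [hww, if_pos ((PySem.Int.mod_eq_zero_iff_dvd _ _).mpr hd)]
      rw [List.reverse_cons, List.foldl_append]
      rw [ih (j + 1) (by rw [show j + 1 + 1 + f = j + 1 + (f + 1) by omega]; exact hfj)]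
      dsimp only [List.foldl_cons, List.foldl_nil]
      set V := pvOrdI q n with hV
      set T := 2 ^ j with hTdef
      have hT : 1 ≤ T := Nat.one_le_two_pow
      have hT2 : (2:Nat) ^ (j + 1) = T * 2 := by rw [hTdef, pow_succ]
      rw [hT2]
      have hle2 : T * 2 ≤ V := by
        have := pvOrdI_le_of_pow_dvd q n hq hn hd
        rw [hT2] at this
        omega
      have hml : V % (T * 2) ≤ V := Nat.mod_le _ _
      set e := V - V % (T * 2) with hedef
      have hedvd : q ^ e ∣ n := (pvOrdI_dvd_iff q n hq hn e).mpr (by omega)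
      obtain ⟨hm1, hordm1⟩ := pvOrdI_div_pow q n hq hn e hedvd
      have hordm1' : pvOrdI q (n / q ^ e) = V % (T * 2) := by rw [hordm1]; omega
      have hdm := Nat.div_add_mod V T
      have hr : V % T < T := Nat.mod_lt _ (by omega)
      have hmm : V % (T * 2) = V % T + T * (V / T % 2) := Nat.mod_mul
      have hdd : V / T / 2 = V / (T * 2) := Nat.div_div_eq_div_mul V T 2
      have hdm2 := Nat.div_add_mod (V / T) 2
      rw [pvValStep_def]
      by_cases hbit : V / T % 2 = 1
      · have hmm1 : V % (T * 2) = V % T + T := by rw [hmm, hbit, Nat.mul_one]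
        have htest : q ^ T ∣ n / q ^ e := by
          rw [pvOrdI_dvd_iff q (n / q ^ e) hq hm1, hordm1']
          omega
        rw [if_pos ((PySem.Int.mod_eq_zero_iff_dvd _ _).mpr htest)]
        rw [PySem.Int.floordiv_eq_ediv_of_pos (by positivity)]
        have heT : q ^ (e + T) ∣ n := by
          rw [pvOrdI_dvd_iff q n hq hn]
          omega
        rw [pvdiv_pow_add q n hq e T heT]
        have hexp : e + T = V - V % T := by omega
        have hnat1 : V / (T * 2) * 2 + 1 = V / T := by
          rw [← hdd]
          omega
        have hv1 : (((V / (T * 2) : Nat) : Int)) * 2 + 1 = ((V / T : Nat) : Int) := by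
          exact_mod_cast hnat1
        rw [hexp, hv1]
      · have hbit0 : V / T % 2 = 0 := by omega
        have hmm0 : V % (T * 2) = V % T := by rw [hmm, hbit0, Nat.mul_zero, Nat.add_zero]
        have htest : ¬ q ^ T ∣ n / q ^ e := by
          rw [pvOrdI_dvd_iff q (n / q ^ e) hq hm1, hordm1']
          omega
        rw [if_neg (fun hc => htest ((PySem.Int.mod_eq_zero_iff_dvd _ _).mp hc))]
        have hnat0 : V / (T * 2) * 2 = V / T := by
          rw [← hdd]
          omega
        have hv1 : (((V / (T * 2) : Nat) : Int)) * 2 = ((V / T : Nat) : Int) := by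
          exact_mod_cast hnat0
        rw [hv1, show e = V - V % T by omega]
    · rw [hww, if_neg (fun hc => hd ((PySem.Int.mod_eq_zero_iff_dvd _ _).mp hc))]
      have hlt : pvOrdI q n < 2 ^ (j + 1) := by
        by_contra hge
        exact hd ((pvOrdI_dvd_iff q n hq hn (2 ^ (j + 1))).mpr (by omega))
      simpa using pvLift_base q n hq hn j hlt

-- B's binary-lifting routine computes the valuation
theorem pvBVal_eq_ord (q n : Int) (hq : 2 ≤ q) (hn : 1 ≤ n) (hb : pvOrdI q n ≤ 31) :
    pvBVal q n = (pvOrdI q n : Int) := by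
  have h := pvLift q n hq hn 64 0 (by norm_num; omega)
  simp only [pow_zero, pow_one] at h
  unfold pvBVal
  rw [h]
  simp

-- the two parity computations agree: A's xor bit equals B's binary-lifted valuation mod 2
theorem pvParity_eq (r p : Int) (hp : 2 ≤ |p|) (hr : r ≠ 0) (hb : |r| ≤ 2 ^ 31) :
    decide (pvALoop r p 0 p 64 ≠ 0) = pvOddVal |p| |r| := by
  have hp0 : p ≠ 0 := fun h => by simp [h] at hp
  have h := pvLoop_corr 64 p 1 r 0 hp0 one_ne_zero
  rw [show PySem.Int.mod (0:Int) 2 = 0 from rfl, one_mul, one_mul] at h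
  have hr1 : 1 ≤ |r| := abs_pos.mpr hr
  have hord := pvOrdI_le_31 |p| |r| hp hr1 hb
  have hB := pvBLoop_eq_ord 64 |p| |r| 0 hp hr1 (by omega)
  have hV := pvBVal_eq_ord |p| |r| hp hr1 hord
  unfold pvOddVal
  rw [h, hB, hV]
  simp only [zero_add]
  have h2 : PySem.Int.mod ((pvOrdI |p| |r| : Nat) : Int) 2 = 0
      ∨ PySem.Int.mod ((pvOrdI |p| |r| : Nat) : Int) 2 = 1 := by
    rw [PySem.Int.mod_eq_emod_of_pos (by norm_num)]
    omega
  rcases h2 with h2 | h2 <;> rw [h2] <;> decide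

-- with the divisibility guard in front: A's bit equals `a % q == 0 and _odd_val(q, a)`
theorem pvParity_eq' (r p : Int) (hp : 2 ≤ |p|) (hr : r ≠ 0) (hb : |r| ≤ 2 ^ 31) :
    decide (pvALoop r p 0 p 64 ≠ 0)
      = decide (PySem.Int.mod |r| |p| = 0 ∧ pvOddVal |p| |r| = true) := by
  have hr1 : 1 ≤ |r| := abs_pos.mpr hr
  by_cases hdvd : |p| ∣ |r|
  · have hm : PySem.Int.mod |r| |p| = 0 := (PySem.Int.mod_eq_zero_iff_dvd _ _).mpr hdvd
    rw [pvParity_eq r p hp hr hb]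
    simp [hm]
  · have hm : PySem.Int.mod |r| |p| ≠ 0 := fun h => hdvd ((PySem.Int.mod_eq_zero_iff_dvd _ _).mp h)
    have hord : pvOrdI |p| |r| = 0 := by rw [pvOrdI, dif_neg (fun hh => hdvd hh.2.2)]
    have hp0 : p ≠ 0 := fun h => by simp [h] at hp
    have h := pvLoop_corr 64 p 1 r 0 hp0 one_ne_zero
    rw [show PySem.Int.mod (0:Int) 2 = 0 from rfl, one_mul, one_mul] at h
    have hB := pvBLoop_eq_ord 64 |p| |r| 0 hp hr1 (by omega)
    rw [h, hB, hord]
    simp [hm]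

theorem pvGather_nodup (f : Int → Bool) (relations : List Int) :
    (pvGather f relations).Nodup := by
  unfold pvGather
  have h1 : ((PySem.List.enumerate relations 0).filter (fun jr => f jr.2)).Pairwise
      (fun a b => a.1 < b.1) := (PySem.List.pairwise_lt_enumerate relations 0).filter _
  exact ((List.Pairwise.map (fun a : Int × Int => a.1) (fun _ _ h => h) h1).imp Int.ne_of_lt)

theorem pvGather_range (f : Int → Bool) (xs : List Int) :
    pvGather f xs = (PySem.List.pyRange 0 (xs.length : Int) 1).filter
      (fun j => f (PySem.List.pyGetD xs j 0)) := by
  unfold pvGather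
  rw [PySem.List.enumerate_eq_map_pyRange (d := 0), List.filter_map, List.map_map]
  simp [Function.comp_def]

theorem pvRow_eq (p : Int) (relations : List Int) :
    (PySem.List.pyRange 0 (relations.length : Int) 1).foldl
      (fun line j =>
        if pvALoop (PySem.List.pyGetD relations j 0) p 0 p 64 ≠ 0 then line ++ [j]
        else line) []
    = pvGather (fun r => decide (pvALoop r p 0 p 64 ≠ 0)) relations := by
  rw [pvGather_range, PySem.List.foldl_append_ite_eq_filter]
  simp

-- A's output in closed form: the sign row, then one gathered row per prime
theorem pvA_closed (relations primes : List Int) :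
    build_sparse_matrix relations primes
      = PySem.Set.ofList (pvGather (fun r => decide (r < 0)) relations)
          :: primes.map (fun p =>
              PySem.Set.ofList (pvGather (fun r => decide (pvALoop r p 0 p 64 ≠ 0)) relations)) := by
  unfold build_sparse_matrix
  dsimp only
  rw [PySem.List.foldl_pyRange_zero_pyGetD' primes 0
        (fun bin p => bin ++ [PySem.Set.ofList
          ((PySem.List.pyRange 0 (relations.length : Int) 1).foldl
            (fun line j =>
              if pvALoop (PySem.List.pyGetD relations j 0) p 0 p 64 ≠ 0 then line ++ [j]
              else line) [])]),
      PySem.List.foldl_append_singleton_eq_map]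
  rw [show (PySem.List.pyRange 0 (relations.length : Int) 1).foldl
      (fun line i => if PySem.List.pyGetD relations i 0 < 0 then line ++ [i] else line) []
      = pvGather (fun r => decide (r < 0)) relations by
    rw [pvGather_range, PySem.List.foldl_append_ite_eq_filter]; simp]
  simp only [List.nil_append, List.singleton_append]
  congr 1
  apply List.map_congr_left
  intro p _
  rw [pvRow_eq]

theorem pvModify_append_cons {α : Type} (done : List α) (row : α) (rest : List α) (f : α → α) :
    (done ++ row :: rest).modify done.length f = done ++ f row :: rest := by
  induction done with
  | nil => simp
  | cons d ds ih => simpa using ih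

-- one relation scattered over all prime rows: the enumerate-fold of conditional modifies is a zipWith
theorem pvInner (v j : Int) (ps : List Int) : ∀ (done rows : List (List Int)), rows.length = ps.length →
    (PySem.List.enumerate ps (done.length : Int)).foldl
      (fun acc ip => if PySem.Int.mod |v| ip.2 = 0 ∧ pvOddVal ip.2 |v| = true then
          acc.modify ip.1.toNat (fun s => PySem.Set.add s j) else acc)
      (done ++ rows)
    = done ++ List.zipWith (fun p row => if PySem.Int.mod |v| p = 0 ∧ pvOddVal p |v| = true then
          PySem.Set.add row j else row) ps rows := by
  induction ps with
  | nil =>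
    intro done rows h
    rw [List.length_eq_zero_iff.mp h]
    simp [PySem.List.enumerate_nil]
  | cons p ps ih =>
    intro done rows h
    cases rows with
    | nil => simp at h
    | cons row rest =>
      rw [PySem.List.enumerate_cons, List.foldl_cons]
      have hstep : ∀ row' : List Int,
          (done ++ row :: rest).modify ((done.length : Int)).toNat (fun s => PySem.Set.add s j)
            = done ++ PySem.Set.add row j :: rest := by
        intro _; simpa using pvModify_append_cons done row rest (fun s => PySem.Set.add s j)
      by_cases hc : PySem.Int.mod |v| p = 0 ∧ pvOddVal p |v| = true
      · rw [if_pos hc, hstep row,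
            show done ++ PySem.Set.add row j :: rest = (done ++ [PySem.Set.add row j]) ++ rest by simp,
            show (done.length : Int) + 1 = (((done ++ [PySem.Set.add row j]).length : Int)) by simp,
            ih (done ++ [PySem.Set.add row j]) rest (by simpa using h)]
        rw [List.zipWith_cons_cons, if_pos hc]
        simp only [List.append_assoc, List.singleton_append]
      · rw [if_neg hc,
            show done ++ row :: rest = (done ++ [row]) ++ rest by simp,
            show (done.length : Int) + 1 = (((done ++ [row]).length : Int)) by simp,
            ih (done ++ [row]) rest (by simpa using h)]
        rw [List.zipWith_cons_cons, if_neg hc]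
        simp only [List.append_assoc, List.singleton_append]

theorem pvZipWith_snd (ps : List Int) : ∀ (rows : List (List Int)), rows.length = ps.length →
    List.zipWith (fun _ row => row) ps rows = rows := by
  induction ps with
  | nil => intro rows h; rw [List.length_eq_zero_iff.mp h]; rfl
  | cons p ps ih =>
    intro rows h
    cases rows with
    | nil => simp at h
    | cons row rest => rw [List.zipWith_cons_cons, ih rest (by simpa using h)]

theorem pvZipWith_zipWith (f g : Int → List Int → List Int) (ps : List Int) :
    ∀ rows, List.zipWith f ps (List.zipWith g ps rows) = List.zipWith (fun p row => f p (g p row)) ps rows := by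
  induction ps with
  | nil => intro rows; rfl
  | cons p ps ih =>
    intro rows
    cases rows with
    | nil => rfl
    | cons row rest => simp only [List.zipWith_cons_cons, ih rest]

theorem pvZipWith_congr_mem (f g : Int → List Int → List Int) (ps : List Int) :
    ∀ (rows : List (List Int)), (∀ p row, row ∈ rows → f p row = g p row) →
    List.zipWith f ps rows = List.zipWith g ps rows := by
  induction ps with
  | nil => intro rows _; rfl
  | cons p ps ih =>
    intro rows hpt
    cases rows with
    | nil => rfl
    | cons row rest =>
      simp only [List.zipWith_cons_cons]
      rw [hpt p row (by simp), ih rest (fun p' row' h' => hpt p' row' (by simp [h']))]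

theorem pvMem_zipWith {α : Type} (f : Int → List α → List α) :
    ∀ (l1 : List Int) (l2 : List (List α)) (a : List α), a ∈ List.zipWith f l1 l2 →
      ∃ x y, x ∈ l1 ∧ y ∈ l2 ∧ a = f x y := by
  intro l1
  induction l1 with
  | nil => intro l2 a h; simp at h
  | cons x l1 ih =>
    intro l2 a h
    cases l2 with
    | nil => simp at h
    | cons y l2 =>
      rw [List.zipWith_cons_cons, List.mem_cons] at h
      rcases h with h | h
      · exact ⟨x, y, by simp, by simp, h⟩
      · obtain ⟨x', y', hx, hy, he⟩ := ih l2 a h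
        exact ⟨x', y', by simp [hx], by simp [hy], he⟩

-- B's whole scatter loop, turned into per-prime gathers (invariant: every stored index is < s)
theorem pvOuter (ps rel : List Int) : ∀ (s : Int) (rows : List (List Int)), rows.length = ps.length →
    (∀ l ∈ rows, ∀ x ∈ l, x < s) →
    (PySem.List.enumerate rel s).foldl
      (fun acc jr => (PySem.List.enumerate ps 0).foldl
         (fun acc2 ip => if PySem.Int.mod |jr.2| ip.2 = 0 ∧ pvOddVal ip.2 |jr.2| = true then
             acc2.modify ip.1.toNat (fun st => PySem.Set.add st jr.1) else acc2) acc) rows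
    = List.zipWith (fun p row => row ++
        ((PySem.List.enumerate rel s).filter
          (fun jr => decide (PySem.Int.mod |jr.2| p = 0 ∧ pvOddVal p |jr.2| = true))).map (·.1)) ps rows := by
  induction rel with
  | nil =>
    intro s rows h _
    rw [PySem.List.enumerate_nil]
    simp only [List.foldl_nil, List.filter_nil, List.map_nil, List.append_nil]
    exact (pvZipWith_snd ps rows h).symm
  | cons r rel ih =>
    intro s rows h hlt
    rw [PySem.List.enumerate_cons, List.foldl_cons]
    have hin := pvInner r s ps ([] : List (List Int)) rows h
    simp only [List.nil_append, List.length_nil, Nat.cast_zero] at hin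
    rw [hin]
    set g := fun (p : Int) (row : List Int) =>
      if PySem.Int.mod |r| p = 0 ∧ pvOddVal p |r| = true then PySem.Set.add row s else row with hg
    have h1 : (List.zipWith g ps rows).length = ps.length := by
      rw [List.length_zipWith]; omega
    have hlt1 : ∀ l ∈ List.zipWith g ps rows, ∀ x ∈ l, x < s + 1 := by
      intro l hl x hx
      obtain ⟨p', row', _, hrow', rfl⟩ := pvMem_zipWith _ _ _ _ hl
      simp only [hg] at hx
      by_cases hc : PySem.Int.mod |r| p' = 0 ∧ pvOddVal p' |r| = true
      · rw [if_pos hc] at hx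
        rcases (PySem.Set.mem_add _ _ _).mp hx with hx' | hx'
        · exact lt_trans (hlt row' hrow' x hx') (by omega)
        · omega
      · rw [if_neg hc] at hx
        exact lt_trans (hlt row' hrow' x hx) (by omega)
    rw [ih (s + 1) (List.zipWith g ps rows) h1 hlt1, pvZipWith_zipWith]
    apply pvZipWith_congr_mem
    intro p row hrow
    have hs : s ∉ row := fun hmem => absurd (hlt row hrow s hmem) (lt_irrefl s)
    simp only [hg]
    rw [List.filter_cons]
    by_cases hc : PySem.Int.mod |r| p = 0 ∧ pvOddVal p |r| = true
    · rw [if_pos hc, if_pos (by simpa using hc), PySem.Set.add_of_not_mem hs]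
      simp
    · rw [if_neg hc, if_neg (by simpa using hc)]

theorem pvZipWith_empty (g : Int → List Int) (ps : List Int) :
    List.zipWith (fun p row => row ++ g p) ps (ps.map (fun _ => PySem.Set.empty)) = ps.map g := by
  induction ps with
  | nil => rfl
  | cons p ps ih =>
    simp only [PySem.Set.empty] at ih ⊢
    simp only [List.map_cons, List.zipWith_cons_cons, ih, List.nil_append]

-- B's output in closed form: the same sign row and the gathered rows, with B's parity test
theorem pvB_closed (relations primes : List Int) :
    build_sparse_matrix_alt relations primes
      = PySem.Set.ofList (pvGather (fun r => decide (r < 0)) relations)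
          :: primes.map (fun p =>
              pvGather (fun r => decide (PySem.Int.mod |r| |p| = 0 ∧ pvOddVal |p| |r| = true)) relations) := by
  unfold build_sparse_matrix_alt
  dsimp only
  rw [PySem.List.foldl_append_ite (p := fun ir : Int × Int => ir.2 < 0) (f := fun ir : Int × Int => ir.1),
      show primes.map (fun _ => (PySem.Set.empty : List Int))
          = (primes.map (fun p => |p|)).map (fun _ => PySem.Set.empty) by simp [List.map_map, Function.comp_def],
      pvOuter (primes.map (fun p => |p|)) relations 0
        ((primes.map (fun p => |p|)).map (fun _ => PySem.Set.empty)) (by simp)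
        (by intro l hl x hx; obtain ⟨_, _, rfl⟩ := List.mem_map.mp hl
            simp [PySem.Set.empty] at hx),
      pvZipWith_empty, List.map_map]
  simp only [List.nil_append, List.singleton_append]
  rfl

-- ===== VERDICT (by name: the statement is the Claim_ definition above) =====
theorem build_sparse_matrix_spec : Claim_equal_build_sparse_matrix := by
  intro relations primes hdom hpre
  unfold Spec_build_sparse_matrix
  rw [pvA_closed, pvB_closed]
  congr 1
  apply List.map_congr_left
  intro p hp
  rw [PySem.Set.ofList_eq_self_of_nodup _ (pvGather_nodup _ _)]
  by_cases hrel : relations = []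
  · subst hrel; rfl
  have hprimes : primes ≠ [] := fun h => by simp [h] at hp
  have hpspec := hpre.2 hrel p hp
  have hp2 : 2 ≤ |p| := by
    rcases hpspec with ⟨h1, h2, h3⟩
    rcases abs_cases p with ⟨he, _⟩ | ⟨he, _⟩ <;> omega
  unfold pvGather
  congr 1
  apply List.filter_congr
  intro jr hjr
  have hjmem : jr.2 ∈ relations := by
    obtain ⟨k, hk, hjr2⟩ := (PySem.List.mem_enumerate_iff _ _ _).mp hjr
    rw [hjr2]
    exact List.getElem_mem hk
  have hr0 : jr.2 ≠ 0 := hpre.1 hprimes jr.2 hjmem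
  have hdomr : pvDomInt jr.2 = true := by
    unfold Dom_build_sparse_matrix at hdom
    simp only [Bool.and_eq_true, List.all_eq_true] at hdom
    exact hdom.1 jr.2 hjmem
  have hb : |jr.2| ≤ 2 ^ 31 := by
    unfold pvDomInt at hdomr
    simp only [decide_eq_true_eq] at hdomr
    rcases abs_cases jr.2 with ⟨he, _⟩ | ⟨he, _⟩ <;> omega
  exact pvParity_eq' jr.2 p hp2 hr0 hb
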